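-- pv_equiv track=rewrite | github.com/jih3508/Study-Algorithm | Python/Leetcode/Medium/Execution of All Suffix Instructions Staying in a Grid.py | executeInstructions
-- ===== SOURCE A (Python) =====
-- from typing import List
--
-- def executeInstructions(n: int, startPos: List[int], s: str) -> List[int]:
--
--     size = len(s) # 명령 문자열의 길이
--     counts = [0 for _ in range(size)] # 결과 배열 초기화
--
--     for i in range(size):
--         # 현재 명령의 시작점부터 끝까지 명령을 슬라이싱
--         moveStr = s[i:size]
--         x = startPos[0] # 로봇의 현재 x 위치
--         y = startPos[1] # 로봇의 현재 y 위치
--         count = 0 # 실행 가능한 명령의 개수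
--         for move in moveStr:
--             fx = x # 이동 후의 x 위치
--             fy = y # 이동 후의 y 위치
--
--             # 현재 명령에 따라 위치 계산
--             match move:
--                 case "L": # 왼쪽으로 이동
--                     fy -= 1
--                 case "R": # 오른쪽으로 이동
--                     fy += 1
--                 case "U":  # 위로 이동
--                     fx -= 1
--                 case "D": # 아래로 이동
--                     fx += 1
--             # 이동 후 위치가 격자 내에 있는지 확인
--             if((0 <= fx < n) and (0 <= fy < n)):
--                 # 현재 위칭 갱신
--                 x, y = fx, fy
--                 count += 1 # 실행 가능한 명령 개수 증가
--             # 격자를 벗어나면 명령 실행 중단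
--             else:
--                 break
--
--         counts[i] = count
--
--     return counts
-- ===== SOURCE B (Python) =====
-- from typing import List
--
-- def executeInstructions(n: int, startPos: List[int], s: str) -> List[int]:
--     # O(m): scan s right-to-left keeping suffix displacement sums and, per axis,
--     # a dict mapping each seen suffix-sum value to its nearest (leftmost) position;
--     # the first grid exit of suffix i must step exactly onto row -1/n or col -1/n,
--     # so it is found by four dict lookups instead of re-simulating the suffix.
--     sx, sy = startPos[0], startPos[1]
--     nxtX = {}  # suffix x-sum value -> steps-from-end of the nearest suffix having it
--     nxtY = {}
--     Sx = Sy = 0  # displacement sums of the processed suffix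
--     k = 0        # length of the processed suffix
--     counts = []
--     for c in reversed(s):
--         nxtX[Sx] = k
--         nxtY[Sy] = k
--         dx = -1 if c == "U" else (1 if c == "D" else 0)
--         dy = -1 if c == "L" else (1 if c == "R" else 0)
--         Sx += dx
--         Sy += dy
--         k += 1
--         if 0 <= sx + dx < n and 0 <= sy + dy < n:
--             hit = max(nxtX.get(sx + Sx + 1, -1), nxtX.get(sx + Sx - n, -1),
--                       nxtY.get(sy + Sy + 1, -1), nxtY.get(sy + Sy - n, -1))
--             counts.append(k - 1 - hit)
--         else:
--             counts.append(0)
--     return counts[::-1]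
-- ===== Notes on version B (the rewrite author's own statement) =====
-- stated objective: faster
-- what changed: A re-simulates every suffix from the start position (O(m^2)); B makes one right-to-left pass keeping suffix displacement sums and two value->nearest-position dictionaries, finding each suffix's first grid exit by four dictionary lookups (the first exit must step exactly onto row/column -1 or n).
-- outside the precondition, e.g. on executeInstructions(0, [], ''): A returns [], B raises IndexError
import Mathlib
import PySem

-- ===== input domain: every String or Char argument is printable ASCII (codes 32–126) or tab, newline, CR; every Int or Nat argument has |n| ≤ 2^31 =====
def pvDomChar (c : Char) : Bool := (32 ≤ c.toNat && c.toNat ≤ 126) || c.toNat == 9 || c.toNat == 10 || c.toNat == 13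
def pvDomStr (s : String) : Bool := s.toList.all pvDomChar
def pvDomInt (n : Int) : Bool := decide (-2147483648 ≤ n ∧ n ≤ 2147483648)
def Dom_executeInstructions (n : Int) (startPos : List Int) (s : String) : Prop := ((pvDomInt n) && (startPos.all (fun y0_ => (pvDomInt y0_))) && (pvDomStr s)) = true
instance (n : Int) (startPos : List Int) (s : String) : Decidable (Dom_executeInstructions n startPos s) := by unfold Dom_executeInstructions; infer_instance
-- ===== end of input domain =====

-- B replaces A's per-suffix re-simulation (O(m^2)) by one right-to-left pass with
-- suffix displacement sums and two next-occurrence dictionaries (O(m)).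

-- ===== PORT A =====
-- inner 'for move in moveStr' loop of A: walk the moves, break at the first exit
def pvSimA (n : Int) (x y : Int) : List Char → Int
  | [] => 0
  | move :: rest =>
    -- 'match move' of A, cases L/R/U/D, default keeps the position
    let fx : Int := if move = 'U' then x - 1 else if move = 'D' then x + 1 else x
    let fy : Int := if move = 'L' then y - 1 else if move = 'R' then y + 1 else y
    if 0 ≤ fx ∧ fx < n ∧ 0 ≤ fy ∧ fy < n then 1 + pvSimA n fx fy rest else 0

def executeInstructions (n : Int) (startPos : List Int) (s : String) : List Int :=
  let cs := s.toList
  let size : Int := (cs.length : Int)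
  -- 'for i in range(size): counts[i] = …' builds counts index by index: a map over range(size)
  (List.range cs.length).map (fun (i : Nat) =>
    let moveStr := PySem.List.slice cs (some (i : Int)) (some size)   -- s[i:size]
    let x := (PySem.List.pyGet? startPos 0).getD 0   -- startPos[0]; IndexError (len < 2) excluded by Pre_
    let y := (PySem.List.pyGet? startPos 1).getD 0   -- startPos[1]
    pvSimA n x y moveStr)

-- ===== PORT B =====
-- '-1 if c == "U" else (1 if c == "D" else 0)' of Source B
def pvDx (c : Char) : Int := if c = 'U' then -1 else if c = 'D' then 1 else 0
-- '-1 if c == "L" else (1 if c == "R" else 0)' of Source B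
def pvDy (c : Char) : Int := if c = 'L' then -1 else if c = 'R' then 1 else 0

-- loop state of Source B: (nxtX, nxtY, Sx, Sy, k, counts)
structure PvBSt where
  nxtX : PySem.Dict Int Int
  nxtY : PySem.Dict Int Int
  Sx : Int
  Sy : Int
  k : Int
  counts : List Int

-- 'for c in reversed(s)': structural recursion that processes the tail (the chars to the
-- right) first, then performs this iteration's body for the head character c
def pvBLoop (n sx sy : Int) : List Char → PvBSt
  | [] => ⟨PySem.Dict.empty, PySem.Dict.empty, 0, 0, 0, []⟩
  | c :: rest =>
    let st := pvBLoop n sx sy rest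
    let nxtX := st.nxtX.insert st.Sx st.k
    let nxtY := st.nxtY.insert st.Sy st.k
    let dx := pvDx c
    let dy := pvDy c
    let Sx := st.Sx + dx
    let Sy := st.Sy + dy
    let k := st.k + 1
    let cnt : Int :=
      if 0 ≤ sx + dx ∧ sx + dx < n ∧ 0 ≤ sy + dy ∧ sy + dy < n then
        -- max(nxtX.get(sx+Sx+1,-1), nxtX.get(sx+Sx-n,-1), nxtY.get(sy+Sy+1,-1), nxtY.get(sy+Sy-n,-1))
        let hit := max (max (nxtX.getD (sx + Sx + 1) (-1)) (nxtX.getD (sx + Sx - n) (-1)))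
                       (max (nxtY.getD (sy + Sy + 1) (-1)) (nxtY.getD (sy + Sy - n) (-1)))
        k - 1 - hit
      else 0
    ⟨nxtX, nxtY, Sx, Sy, k, st.counts ++ [cnt]⟩

def executeInstructions_alt (n : Int) (startPos : List Int) (s : String) : List Int :=
  let sx := (PySem.List.pyGet? startPos 0).getD 0   -- startPos[0]; IndexError (len < 2) excluded by Pre_
  let sy := (PySem.List.pyGet? startPos 1).getD 0   -- startPos[1]
  (pvBLoop n sx sy s.toList).counts.reverse          -- counts[::-1]

-- ===== PRECONDITION & SPEC =====
-- Pre_ excludes only startPos shorter than 2, on which both Pythons raise IndexError — except when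
-- s = '' where A returns [] before ever indexing startPos while B reads startPos[0] up front and raises.
def Pre_executeInstructions (n : Int) (startPos : List Int) (s : String) : Prop := 2 ≤ startPos.length
instance (n : Int) (startPos : List Int) (s : String) : Decidable (Pre_executeInstructions n startPos s) := by unfold Pre_executeInstructions; infer_instance

def pvWitness_executeInstructions : Int × List Int × String := (3, [1, 0], "RRDDLUU")

def Spec_executeInstructions (n : Int) (startPos : List Int) (s : String) (out : List Int) : Prop := out = executeInstructions_alt n startPos s
instance (n : Int) (startPos : List Int) (s : String) (out : List Int) : Decidable (Spec_executeInstructions n startPos s out) := by unfold Spec_executeInstructions; infer_instance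

-- ===== CLAIM (what is proved, stated in full; the proofs are below) =====
def Claim_equal_executeInstructions : Prop := ∀ (n : Int) (startPos : List Int) (s : String), Dom_executeInstructions n startPos s → Pre_executeInstructions n startPos s → Spec_executeInstructions n startPos s (executeInstructions n startPos s)

-- ===== LEMMAS AND PROOFS =====

-- x-/y-displacement of a list of moves
def pvSumX : List Char → Int
  | [] => 0
  | c :: r => pvDx c + pvSumX r
def pvSumY : List Char → Int
  | [] => 0
  | c :: r => pvDy c + pvSumY r

-- value of B's nxtX dictionary built over all suffixes of q: length of the longest
-- suffix of q whose x-displacement is v (first match in q.tails), else -1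
def pvLookX (q : List Char) (v : Int) : Int :=
  ((q.tails.find? (fun r => pvSumX r == v)).map (fun r => (r.length : Int))).getD (-1)
def pvLookY (q : List Char) (v : Int) : Int :=
  ((q.tails.find? (fun r => pvSumY r == v)).map (fun r => (r.length : Int))).getD (-1)

-- the four boundary lookups of Source B for the suffix l, dictionaries built over q
def pvHit (n sx sy : Int) (l q : List Char) : Int :=
  max (max (pvLookX q (sx + pvSumX l + 1)) (pvLookX q (sx + pvSumX l - n)))
      (max (pvLookY q (sy + pvSumY l + 1)) (pvLookY q (sy + pvSumY l - n)))

lemma pvLookX_le (q : List Char) (v : Int) : pvLookX q v ≤ (q.length : Int) := by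
  unfold pvLookX
  cases h : q.tails.find? (fun r => pvSumX r == v) with
  | none => simp
  | some r =>
    have hm := List.mem_of_find?_eq_some h
    rw [List.mem_tails] at hm
    have := hm.length_le
    simp
    exact_mod_cast this
lemma pvLookY_le (q : List Char) (v : Int) : pvLookY q v ≤ (q.length : Int) := by
  unfold pvLookY
  cases h : q.tails.find? (fun r => pvSumY r == v) with
  | none => simp
  | some r =>
    have hm := List.mem_of_find?_eq_some h
    rw [List.mem_tails] at hm
    have := hm.length_le
    simp
    exact_mod_cast this

lemma pvLookX_self (q : List Char) (v : Int) (h : pvSumX q = v) : pvLookX q v = (q.length : Int) := by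
  unfold pvLookX
  cases q with
  | nil => simp [h]
  | cons c r => rw [List.tails_cons, List.find?_cons_of_pos (by simp [h])]; simp
lemma pvLookY_self (q : List Char) (v : Int) (h : pvSumY q = v) : pvLookY q v = (q.length : Int) := by
  unfold pvLookY
  cases q with
  | nil => simp [h]
  | cons c r => rw [List.tails_cons, List.find?_cons_of_pos (by simp [h])]; simp

lemma pvLookX_cons_ne (c : Char) (q : List Char) (v : Int) (h : pvSumX (c :: q) ≠ v) :
    pvLookX (c :: q) v = pvLookX q v := by
  unfold pvLookX
  rw [List.tails_cons, List.find?_cons_of_neg (by simp [h])]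
lemma pvLookY_cons_ne (c : Char) (q : List Char) (v : Int) (h : pvSumY (c :: q) ≠ v) :
    pvLookY (c :: q) v = pvLookY q v := by
  unfold pvLookY
  rw [List.tails_cons, List.find?_cons_of_neg (by simp [h])]

lemma pvDx_bound (c : Char) : -1 ≤ pvDx c ∧ pvDx c ≤ 1 := by
  unfold pvDx; split_ifs <;> omega
lemma pvDy_bound (c : Char) : -1 ≤ pvDy c ∧ pvDy c ≤ 1 := by
  unfold pvDy; split_ifs <;> omega

lemma pvLookX_nil (v : Int) (h : v ≠ 0) : pvLookX [] v = -1 := by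
  simp [pvLookX, pvSumX, List.find?, h.symm]
lemma pvLookY_nil (v : Int) (h : v ≠ 0) : pvLookY [] v = -1 := by
  simp [pvLookY, pvSumY, List.find?, h.symm]

-- one step of A's inner loop, with the position update written via pvDx/pvDy
lemma pvSimA_cons (n sx sy : Int) (c : Char) (q : List Char) : pvSimA n sx sy (c :: q) =
    (if 0 ≤ sx + pvDx c ∧ sx + pvDx c < n ∧ 0 ≤ sy + pvDy c ∧ sy + pvDy c < n then
      1 + pvSimA n (sx + pvDx c) (sy + pvDy c) q else 0) := by
  have hx : (if c = 'U' then sx - 1 else if c = 'D' then sx + 1 else sx) = sx + pvDx c := by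
    unfold pvDx; split_ifs <;> ring
  have hy : (if c = 'L' then sy - 1 else if c = 'R' then sy + 1 else sy) = sy + pvDy c := by
    unfold pvDy; split_ifs <;> ring
  simp only [pvSimA]
  rw [hx, hy]

-- pvHit only depends on the shifted sums sx + pvSumX l and sy + pvSumY l
lemma pvHit_shift {n sx sy sx' sy' : Int} {l l' q : List Char}
    (h1 : sx + pvSumX l = sx' + pvSumX l') (h2 : sy + pvSumY l = sy' + pvSumY l') :
    pvHit n sx sy l q = pvHit n sx' sy' l' q := by
  unfold pvHit; rw [h1, h2]

lemma pvMax4_eq {a b c d L : Int} (ha : a ≤ L) (hb : b ≤ L) (hc : c ≤ L) (hd : d ≤ L)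
    (h : a = L ∨ b = L ∨ c = L ∨ d = L) : max (max a b) (max c d) = L := by
  apply le_antisymm (max_le (max_le ha hb) (max_le hc hd))
  rcases h with h | h | h | h
  · exact h ▸ le_trans (le_max_left a b) (le_max_left _ _)
  · exact h ▸ le_trans (le_max_right a b) (le_max_left _ _)
  · exact h ▸ le_trans (le_max_left c d) (le_max_right _ _)
  · exact h ▸ le_trans (le_max_right c d) (le_max_right _ _)

-- A's inner loop expressed through B's boundary-lookup formula (the heart of the proof)
lemma pvSim_formula (n : Int) : ∀ (q : List Char) (c : Char) (sx sy : Int),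
    pvSimA n sx sy (c :: q) =
      if 0 ≤ sx + pvDx c ∧ sx + pvDx c < n ∧ 0 ≤ sy + pvDy c ∧ sy + pvDy c < n then
        (q.length : Int) - pvHit n sx sy (c :: q) q
      else 0 := by
  intro q
  induction q with
  | nil =>
    intro c sx sy
    rw [pvSimA_cons]
    split_ifs with h
    · have hhit : pvHit n sx sy [c] [] = -1 := by
        unfold pvHit
        rw [pvLookX_nil _ (by simp [pvSumX]; omega), pvLookX_nil _ (by simp [pvSumX]; omega),
            pvLookY_nil _ (by simp [pvSumY]; omega), pvLookY_nil _ (by simp [pvSumY]; omega)]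
        simp
      rw [hhit]; simp [pvSimA]
    · rfl
  | cons c' q' ih =>
    intro c sx sy
    rw [pvSimA_cons]
    split_ifs with h1
    · rw [ih c' (sx + pvDx c) (sy + pvDy c)]
      have hsh : pvHit n (sx + pvDx c) (sy + pvDy c) (c' :: q') q' = pvHit n sx sy (c :: c' :: q') q' :=
        pvHit_shift (by simp [pvSumX]; ring) (by simp [pvSumY]; ring)
      rw [hsh]
      have hK1 : sx + pvSumX (c :: c' :: q') + 1 ≠ pvSumX (c' :: q') := by
        simp only [pvSumX]; omega
      have hK2 : sx + pvSumX (c :: c' :: q') - n ≠ pvSumX (c' :: q') := by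
        simp only [pvSumX]; omega
      have hK3 : sy + pvSumY (c :: c' :: q') + 1 ≠ pvSumY (c' :: q') := by
        simp only [pvSumY]; omega
      have hK4 : sy + pvSumY (c :: c' :: q') - n ≠ pvSumY (c' :: q') := by
        simp only [pvSumY]; omega
      have hstep : pvHit n sx sy (c :: c' :: q') (c' :: q') = pvHit n sx sy (c :: c' :: q') q' := by
        unfold pvHit
        rw [pvLookX_cons_ne _ _ _ (Ne.symm hK1), pvLookX_cons_ne _ _ _ (Ne.symm hK2),
            pvLookY_cons_ne _ _ _ (Ne.symm hK3), pvLookY_cons_ne _ _ _ (Ne.symm hK4)]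
      rw [hstep]
      split_ifs with h2
      · simp only [List.length_cons]; push_cast; ring
      · -- the next step leaves the grid: the hit is exactly q'.length
        have hdx := pvDx_bound c'
        have hdy := pvDy_bound c'
        have hcases : sx + pvDx c + pvDx c' = -1 ∨ sx + pvDx c + pvDx c' = n ∨
            sy + pvDy c + pvDy c' = -1 ∨ sy + pvDy c + pvDy c' = n := by omega
        have hhit : pvHit n sx sy (c :: c' :: q') q' = (q'.length : Int) := by
          unfold pvHit
          apply pvMax4_eq (pvLookX_le _ _) (pvLookX_le _ _) (pvLookY_le _ _) (pvLookY_le _ _)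
          rcases hcases with hc2 | hc2 | hc2 | hc2
          · exact Or.inl (pvLookX_self _ _ (by simp only [pvSumX]; omega))
          · exact Or.inr (Or.inl (pvLookX_self _ _ (by simp only [pvSumX]; omega)))
          · exact Or.inr (Or.inr (Or.inl (pvLookY_self _ _ (by simp only [pvSumY]; omega))))
          · exact Or.inr (Or.inr (Or.inr (pvLookY_self _ _ (by simp only [pvSumY]; omega))))
        rw [hhit]
        simp only [List.length_cons]; push_cast; ring
    · rfl

-- the state invariant of B's right-to-left loop
lemma pvBLoop_inv (n sx sy : Int) : ∀ l : List Char,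
    (pvBLoop n sx sy l).Sx = pvSumX l ∧ (pvBLoop n sx sy l).Sy = pvSumY l ∧
    (pvBLoop n sx sy l).k = (l.length : Int) ∧
    (∀ v, (((pvBLoop n sx sy l).nxtX.insert (pvSumX l) (l.length : Int)).getD v (-1)) = pvLookX l v) ∧
    (∀ v, (((pvBLoop n sx sy l).nxtY.insert (pvSumY l) (l.length : Int)).getD v (-1)) = pvLookY l v) := by
  intro l
  induction l with
  | nil =>
    refine ⟨rfl, rfl, rfl, ?_, ?_⟩ <;> intro v <;>
      simp only [pvSumX, pvSumY] <;> rw [PySem.Dict.getD_insert] <;> by_cases hv : v = (0 : Int)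
    · simp [pvBLoop, pvLookX, pvSumX, List.find?, hv]
    · simp [pvBLoop, pvLookX, pvSumX, List.find?, hv, Ne.symm hv]
    · simp [pvBLoop, pvLookY, pvSumY, List.find?, hv]
    · simp [pvBLoop, pvLookY, pvSumY, List.find?, hv, Ne.symm hv]
  | cons c l ihl =>
    obtain ⟨hSx, hSy, hk, hDX, hDY⟩ := ihl
    simp only [pvBLoop]
    rw [hSx, hSy, hk]
    refine ⟨by simp only [pvSumX]; omega, by simp only [pvSumY]; omega,
      by simp only [List.length_cons]; push_cast; ring, ?_, ?_⟩ <;> intro v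
    · rw [PySem.Dict.getD_insert]
      by_cases hv : v = pvSumX (c :: l)
      · rw [if_pos hv, pvLookX_self (c :: l) v hv.symm]
      · rw [if_neg hv, hDX v, pvLookX_cons_ne c l v (fun h => hv h.symm)]
    · rw [PySem.Dict.getD_insert]
      by_cases hv : v = pvSumY (c :: l)
      · rw [if_pos hv, pvLookY_self (c :: l) v hv.symm]
      · rw [if_neg hv, hDY v, pvLookY_cons_ne c l v (fun h => hv h.symm)]

lemma pvBLoop_counts (n sx sy : Int) : ∀ l : List Char,
    (pvBLoop n sx sy l).counts =
      ((List.range l.length).map (fun i => pvSimA n sx sy (l.drop i))).reverse := by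
  intro l
  induction l with
  | nil => simp [pvBLoop]
  | cons c l ih =>
    obtain ⟨hSx, hSy, hk, hDX, hDY⟩ := pvBLoop_inv n sx sy l
    simp only [pvBLoop]
    rw [hSx, hSy, hk]
    have hKx1 : sx + (pvSumX l + pvDx c) + 1 = sx + pvSumX (c :: l) + 1 := by
      simp only [pvSumX]; ring
    have hKx2 : sx + (pvSumX l + pvDx c) - n = sx + pvSumX (c :: l) - n := by
      simp only [pvSumX]; ring
    have hKy1 : sy + (pvSumY l + pvDy c) + 1 = sy + pvSumY (c :: l) + 1 := by
      simp only [pvSumY]; ring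
    have hKy2 : sy + (pvSumY l + pvDy c) - n = sy + pvSumY (c :: l) - n := by
      simp only [pvSumY]; ring
    rw [hKx1, hKx2, hKy1, hKy2, hDX, hDX, hDY, hDY]
    have hcnt : (if 0 ≤ sx + pvDx c ∧ sx + pvDx c < n ∧ 0 ≤ sy + pvDy c ∧ sy + pvDy c < n then
        (l.length : Int) + 1 - 1 -
          max (max (pvLookX l (sx + pvSumX (c :: l) + 1)) (pvLookX l (sx + pvSumX (c :: l) - n)))
              (max (pvLookY l (sy + pvSumY (c :: l) + 1)) (pvLookY l (sy + pvSumY (c :: l) - n)))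
      else 0) = pvSimA n sx sy (c :: l) := by
      rw [pvSim_formula n l c sx sy]
      unfold pvHit
      split_ifs
      · ring
      · rfl
    rw [ih, hcnt]
    simp only [List.length_cons, List.range_succ_eq_map, List.map_cons, List.map_map,
      List.reverse_cons]
    congr 1

-- ===== VERDICT (by name: the statement is the Claim_ definition above) =====
theorem executeInstructions_spec : Claim_equal_executeInstructions := by
  intro n startPos s _ _
  unfold Spec_executeInstructions executeInstructions executeInstructions_alt
  dsimp only
  rw [pvBLoop_counts, List.reverse_reverse]
  apply List.map_congr_left
  intro i hi
  rw [List.mem_range] at hi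
  rw [PySem.List.slice_natCast, List.take_of_length_le (by simp)]
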